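-- pv_equiv track=rewrite | github.com/zsderw/CodingTest | 프로그래머스/lv3/12987. 숫자 게임/숫자 게임.py | solution
-- ===== SOURCE A (Python) =====
-- def solution(A, B):
--     answer = 0
--     A.sort()
--     B.sort()
--     for i in range(len(A)):
--         if A[i] < B[i]:
--             answer += 1
--         else:
--             for j in range(i + 1, len(A)):
--                 if A[i] < B[j]:
--                     answer += 1
--                     t = B[j]
--                     B[j] = B[i]
--                     B[i] = t
--                     break
--     return answer
-- ===== SOURCE B (Python) =====
-- def solution(A, B):
--     # Sort both sides, then a single two-pointer sweep: for each a-value in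
--     # ascending order, take the smallest still-unused b-value that beats it.
--     # Only the len(A) smallest values of B can ever take part in the pairing
--     # (the problem pairs the lists one-to-one), hence the slice.
--     # (Unlike A, this does not mutate its arguments; return value is the same.)
--     sa = sorted(A)
--     sb = sorted(B)[:len(A)]
--     pos = 0
--     ans = 0
--     for x in sa:
--         while pos < len(sb) and sb[pos] <= x:
--             pos += 1
--         if pos < len(sb):
--             ans += 1
--             pos += 1
--     return ans
-- ===== Notes on version B (the rewrite author's own statement) =====
-- stated objective: faster
-- what changed: Replaced A's quadratic loop (for each position, linear rescan of B plus an in-place swap) with a single two-pointer sweep over the two sorted lists; B also does not mutate its arguments.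
import Mathlib
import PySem

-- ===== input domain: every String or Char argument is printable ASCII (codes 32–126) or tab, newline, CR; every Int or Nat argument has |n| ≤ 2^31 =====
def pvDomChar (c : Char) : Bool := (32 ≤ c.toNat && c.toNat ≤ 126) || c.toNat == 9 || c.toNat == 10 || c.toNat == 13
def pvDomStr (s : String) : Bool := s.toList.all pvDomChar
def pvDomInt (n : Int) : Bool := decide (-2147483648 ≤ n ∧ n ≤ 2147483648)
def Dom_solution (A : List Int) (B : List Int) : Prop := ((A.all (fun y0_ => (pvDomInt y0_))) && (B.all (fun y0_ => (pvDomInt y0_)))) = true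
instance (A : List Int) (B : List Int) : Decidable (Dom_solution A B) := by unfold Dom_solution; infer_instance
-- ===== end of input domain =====

-- B replaces A's quadratic rescan-and-swap loop with a single two-pointer sweep over the
-- two sorted lists (same return value; unlike A, B does not mutate its arguments in place).

-- ===== PORT A =====
-- inner loop 'for j in range(i+1, len(A)): if A[i] < B[j]: … break' — returns the first such j
def pvInnerA (x : Int) (b : List Int) : List Int → Option Int
  | [] => none
  | j :: js => if x < PySem.List.pyGetD b j 0 then some j else pvInnerA x b js

-- one iteration of A's outer loop: state = (current B list, answer)
def pvStepA (a : List Int) (st : List Int × Int) (i : Int) : List Int × Int :=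
  let b := st.1
  let x := PySem.List.pyGetD a i 0
  if x < PySem.List.pyGetD b i 0 then (b, st.2 + 1)
  else
    match pvInnerA x b (PySem.List.pyRange (i + 1) a.length 1) with
    | some j =>
        let t := PySem.List.pyGetD b j 0
        (PySem.List.pySetD (PySem.List.pySetD b j (PySem.List.pyGetD b i 0)) i t, st.2 + 1)
    | none => st

def solution (A : List Int) (B : List Int) : Int :=
  let a := PySem.List.sorted A (fun v => v) false
  let b := PySem.List.sorted B (fun v => v) false
  ((PySem.List.pyRange 0 a.length 1).foldl (pvStepA a) (b, 0)).2

-- ===== PORT B =====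
-- 'while pos < len(sb) and sb[pos] <= x: pos += 1'
def pvAdvance (sb : List Int) (x : Int) (pos : Nat) : Nat :=
  if h : pos < sb.length then
    if sb[pos] ≤ x then pvAdvance sb x (pos + 1) else pos
  else pos
termination_by sb.length - pos

-- one iteration of B's loop: state = (pos, ans)
def pvStepB (sb : List Int) (st : Nat × Int) (x : Int) : Nat × Int :=
  let pos := pvAdvance sb x st.1
  if pos < sb.length then (pos + 1, st.2 + 1) else (pos, st.2)

def solution_alt (A : List Int) (B : List Int) : Int :=
  let sa := PySem.List.sorted A (fun v => v) false
  let sb := PySem.List.slice (PySem.List.sorted B (fun v => v) false) none (some (A.length : Int))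
  (sa.foldl (pvStepB sb) (0, 0)).2

-- ===== PRECONDITION & SPEC =====
-- Exactly the inputs on which A returns normally: A raises IndexError when
-- len(B) < len(A) (it indexes B at every position up to len(A)-1).
def Pre_solution (A : List Int) (B : List Int) : Prop := A.length ≤ B.length
instance (A : List Int) (B : List Int) : Decidable (Pre_solution A B) := by
  unfold Pre_solution; infer_instance

def pvWitness_solution : List Int × List Int := ([3, 1, 5], [4, 4, 2])

def Spec_solution (A : List Int) (B : List Int) (out : Int) : Prop := out = solution_alt A B
instance (A : List Int) (B : List Int) (out : Int) : Decidable (Spec_solution A B out) := by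
  unfold Spec_solution; infer_instance

-- ===== CLAIM (what is proved, stated in full; the proofs are below) =====
def Claim_equal_solution : Prop := ∀ (A : List Int) (B : List Int), Dom_solution A B → Pre_solution A B → Spec_solution A B (solution A B)

-- ===== LEMMAS AND PROOFS =====

-- first index in a list satisfying p
def pvFind (p : Int → Bool) : List Int → Option Nat
  | [] => none
  | t :: ts => if p t then some 0 else (pvFind p ts).map (· + 1)

-- A's loop, rephrased as structural recursion on the suffixes (proof-side only)
def pvF : List Int → List Int → Int
  | [], _ => 0
  | _ :: _, [] => 0
  | x :: a', y :: u' =>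
    if x < y then 1 + pvF a' u'
    else
      match pvFind (fun t => x < t) u' with
      | some j => 1 + pvF a' (u'.set j y)
      | none => pvF a' u'

-- the sorted-greedy: for each x ascending, consume the smallest remaining element > x
def pvG : List Int → List Int → Int
  | [], _ => 0
  | x :: a', s =>
    match s.dropWhile (fun y => y ≤ x) with
    | [] => 0
    | _ :: s' => 1 + pvG a' s'

-- u is s (order kept) with extra "dud" elements satisfying P interleaved
inductive pvMix (P : Int → Prop) : List Int → List Int → Prop
  | nil : pvMix P [] []
  | keep {s u : List Int} (y : Int) : pvMix P s u → pvMix P (y :: s) (y :: u)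
  | dud {s u : List Int} {y : Int} : P y → pvMix P s u → pvMix P s (y :: u)

theorem pvMix_refl (P : Int → Prop) (s : List Int) : pvMix P s s := by
  induction s with
  | nil => exact pvMix.nil
  | cons y t ih => exact pvMix.keep y ih

theorem pvMix_mono {P Q : Int → Prop} (h : ∀ y, P y → Q y) {s u : List Int}
    (m : pvMix P s u) : pvMix Q s u := by
  induction m with
  | nil => exact pvMix.nil
  | keep y _ ih => exact pvMix.keep y ih
  | dud hy _ ih => exact pvMix.dud (h _ hy) ih

theorem pvMix_all_dud {P : Int → Prop} {u : List Int} (h : ∀ y ∈ u, P y) : pvMix P [] u := by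
  induction u with
  | nil => exact pvMix.nil
  | cons y t ih =>
      exact pvMix.dud (h y (by simp)) (ih (fun z hz => h z (by simp [hz])))

theorem pvMix_mem {P : Int → Prop} {s u : List Int} (m : pvMix P s u) :
    ∀ y ∈ u, y ∈ s ∨ P y := by
  induction m with
  | nil => simp
  | keep z _ ih =>
      intro y hy
      rcases List.mem_cons.mp hy with h | h
      · exact Or.inl (by simp [h])
      · rcases ih y h with h' | h'
        · exact Or.inl (by simp [h'])
        · exact Or.inr h'
  | dud hz _ ih =>
      intro y hy
      rcases List.mem_cons.mp hy with h | h
      · exact Or.inr (h ▸ hz)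
      · exact ih y h

theorem pvFind_eq_none {x : Int} {u : List Int} (h : ∀ t ∈ u, t ≤ x) :
    pvFind (fun t => x < t) u = none := by
  induction u with
  | nil => rfl
  | cons t ts ih =>
      have h1 : t ≤ x := h t (by simp)
      have h2 : ∀ t ∈ ts, t ≤ x := fun z hz => h z (by simp [hz])
      simp [pvFind, ih h2, not_lt.mpr h1]

-- the inner scan finds the head of s.dropWhile (≤ x); replacing it by a dud keeps the Mix
theorem pvMix_find {x : Int} {s u z : _} {s' : List Int}
    (hs : s.Pairwise (· ≤ ·)) (m : pvMix (fun y => y ≤ x) s u)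
    (hd : s.dropWhile (fun y => y ≤ x) = z :: s') :
    ∃ j, pvFind (fun t => x < t) u = some j ∧
      ∀ y, y ≤ x → pvMix (fun t => t ≤ x) s' (u.set j y) := by
  induction m with
  | nil => simp at hd
  | @keep s₀ u₀ v m₀ ih =>
      by_cases hv : v ≤ x
      · have hd' : s₀.dropWhile (fun y => y ≤ x) = z :: s' := by
          simpa [List.dropWhile_cons, hv] using hd
        obtain ⟨j, hj, hset⟩ := ih (List.Pairwise.of_cons hs) hd'
        refine ⟨j + 1, ?_, ?_⟩
        · simp [pvFind, not_lt.mpr hv, hj]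
        · intro y hy
          simpa using pvMix.dud (P := fun t => t ≤ x) hv (hset y hy)
      · have hxv : x < v := lt_of_not_ge hv
        have hzv : z = v ∧ s' = s₀ := by
          have : (v :: s₀).dropWhile (fun y => y ≤ x) = v :: s₀ := by
            simp [hv]
          rw [this] at hd
          exact ⟨(List.cons.injEq _ _ _ _ ▸ hd).1.symm, (List.cons.injEq _ _ _ _ ▸ hd).2.symm⟩
        refine ⟨0, by simp [pvFind, hxv], ?_⟩
        intro y hy
        rw [hzv.2]
        simpa using pvMix.dud (P := fun y => y ≤ x) hy m₀
  | @dud s₀ u₀ w hw m₀ ih =>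
      obtain ⟨j, hj, hset⟩ := ih hs hd
      refine ⟨j + 1, ?_, ?_⟩
      · simp [pvFind, not_lt.mpr hw, hj]
      · intro y hy
        simpa using pvMix.dud (P := fun t => t ≤ x) hw (hset y hy)

theorem pvG_nil (a : List Int) : pvG a [] = 0 := by
  cases a with
  | nil => rfl
  | cons x a' => simp [pvG]

-- MAIN LEMMA: A's suffix recursion equals the sorted greedy, under the Mix invariant
theorem pvF_eq_pvG : ∀ (a s u : List Int), a.Pairwise (· ≤ ·) → s.Pairwise (· ≤ ·) →
    pvMix (fun y => ∀ z ∈ a, y ≤ z) s u → u.length = a.length → pvF a u = pvG a s := by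
  intro a
  induction a with
  | nil => intro s u _ _ _ _; simp [pvF, pvG]
  | cons x a' ih =>
      intro s u ha hs m hlen
      cases u with
      | nil => simp at hlen
      | cons y u' =>
        have hax : ∀ z ∈ a', x ≤ z := by
          intro z hz
          exact (List.pairwise_cons.mp ha).1 z hz
        have ha' : a'.Pairwise (· ≤ ·) := (List.pairwise_cons.mp ha).2
        have hlen' : u'.length = a'.length := by simpa using hlen
        -- common handler for the two "y is not counted at its position" cases:
        -- y ≤ x and Mix (≤ x) s₁ u' with s₁ sorted, dropWhile s = dropWhile s₁
        have main : ∀ (s₁ : List Int), s₁.Pairwise (· ≤ ·) → y ≤ x →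
            pvMix (fun t => t ≤ x) s₁ u' →
            s.dropWhile (fun t => t ≤ x) = s₁.dropWhile (fun t => t ≤ x) →
            pvF (x :: a') (y :: u') = pvG (x :: a') s := by
          intro s₁ hs₁ hyx m₁ hdw
          have hxy : ¬ x < y := not_lt.mpr hyx
          cases hcase : s₁.dropWhile (fun t => t ≤ x) with
          | nil =>
              have hall : ∀ t ∈ s₁, t ≤ x := by
                intro t ht
                have := List.dropWhile_eq_nil_iff.mp hcase t ht
                simpa using this
              have hu' : ∀ t ∈ u', t ≤ x := by
                intro t ht
                rcases pvMix_mem m₁ t ht with h | h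
                · exact hall t h
                · exact h
              have hnone := pvFind_eq_none hu'
              have hmix' : pvMix (fun y => ∀ z ∈ a', y ≤ z) [] u' :=
                pvMix_all_dud (fun t ht z hz => le_trans (hu' t ht) (hax z hz))
              have h0 : pvF a' u' = 0 := by
                rw [ih [] u' ha' (by simp) hmix' hlen', pvG_nil]
              simp [pvF, hxy, hnone, h0, pvG, hdw, hcase]
          | cons z s' =>
              obtain ⟨j, hj, hset⟩ := pvMix_find hs₁ m₁ hcase
              have hs' : s'.Pairwise (· ≤ ·) := by
                have : (z :: s').Sublist s₁ := hcase ▸ List.dropWhile_sublist _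
                exact ((hs₁.sublist this).sublist (List.sublist_cons_self z s'))
              have hmix' : pvMix (fun t => ∀ z ∈ a', t ≤ z) s' (u'.set j y) :=
                pvMix_mono (fun t ht z hz => le_trans ht (hax z hz)) (hset y hyx)
              have hrec := ih s' (u'.set j y) ha' hs' hmix' (by simpa using hlen')
              simp [pvF, hxy, hj, hrec, pvG, hdw, hcase]
        cases m with
        | keep _ m₀ =>
            -- y is the smallest remaining live element
            rename_i s₀
            have hs₀ : s₀.Pairwise (· ≤ ·) := (List.pairwise_cons.mp hs).2
            by_cases hxy : x < y
            · -- counted in place; greedy also takes y (all of s is > x)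
              have hdw : (y :: s₀).dropWhile (fun t => t ≤ x) = y :: s₀ := by
                simp [not_le.mpr hxy]
              have hmix' : pvMix (fun t => ∀ z ∈ a', t ≤ z) s₀ u' :=
                pvMix_mono (fun t ht z hz => ht z (by simp [hz])) m₀
              have hrec := ih s₀ u' ha' hs₀ hmix' hlen'
              simp [pvF, hxy, hrec, pvG, hdw]
            · have hyx : y ≤ x := not_lt.mp hxy
              have hdw : (y :: s₀).dropWhile (fun t => t ≤ x) = s₀.dropWhile (fun t => t ≤ x) := by
                simp [hyx]
              exact main s₀ hs₀ hyx
                (pvMix_mono (fun t ht => ht x (by simp)) m₀) hdw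
        | dud hy m₀ =>
            exact main s hs (hy x (by simp))
              (pvMix_mono (fun t ht => ht x (by simp)) m₀) rfl

-- ===== bridge A: the indexed fold equals the suffix recursion =====

theorem pvInnerA_eq_find (x : Int) (bf : List Int) (m : Nat) (hm : m ≤ bf.length) :
    ∀ i : Nat, i ≤ m →
      pvInnerA x bf (PySem.List.pyRange i m 1) =
        (pvFind (fun t => x < t) ((bf.drop i).take (m - i))).map
          (fun j => ((i + j : Nat) : Int)) := by
  intro i
  induction hk : m - i generalizing i with
  | zero =>
      intro hi
      have : (m : Int) ≤ i := by omega
      rw [PySem.List.pyRange_one_eq_nil this]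
      simp [pvInnerA, pvFind]
  | succ k ihk =>
      intro hi
      have hlt : i < m := by omega
      have hltb : i < bf.length := by omega
      rw [PySem.List.pyRange_one_cons (by exact_mod_cast hlt)]
      rw [show (bf.drop i).take (k + 1) = bf[i] :: ((bf.drop (i + 1)).take k) from by
        rw [List.drop_eq_getElem_cons hltb, List.take_succ_cons]]
      have hget : PySem.List.pyGetD bf (i : Int) 0 = bf[i] := by
        simp [PySem.List.pyGetD_natCast, List.getD_eq_getElem?_getD, hltb]
      by_cases hx : x < bf[i]
      · simp [pvInnerA, hget, hx, pvFind]
      · have : ((i : Int) + 1) = ((i + 1 : Nat) : Int) := by push_cast; ring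
        rw [pvInnerA, hget, if_neg hx, this, ihk (i + 1) (by omega) (by omega)]
        cases hf : pvFind (fun t => decide (x < t)) ((List.drop (i + 1) bf).take k) with
        | none => simp [pvFind, hx, hf]
        | some j =>
            simp [pvFind, hx, hf]
            ring

theorem pvBridgeA (a : List Int) :
    ∀ (i : Nat) (bf : List Int) (ans : Int), a.length ≤ bf.length → i ≤ a.length →
      ((PySem.List.pyRange i a.length 1).foldl (pvStepA a) (bf, ans)).2 =
        ans + pvF (a.drop i) ((bf.drop i).take (a.length - i)) := by
  intro i
  induction hk : a.length - i generalizing i with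
  | zero =>
      intro bf ans hlen hi
      have h1 : (a.length : Int) ≤ i := by omega
      have hda : a.drop i = [] := List.drop_eq_nil_of_le (by omega)
      rw [PySem.List.pyRange_one_eq_nil h1, hda]
      simp [pvF]
  | succ k ihk =>
      intro bf ans hlen hi
      have hlt : i < a.length := by omega
      have hltb : i < bf.length := by omega
      rw [PySem.List.pyRange_one_cons (by exact_mod_cast hlt)]
      rw [show ((i : Int) + 1) = ((i + 1 : Nat) : Int) from by omega]
      rw [List.drop_eq_getElem_cons hlt]
      rw [show (bf.drop i).take (k + 1) = bf[i] :: ((bf.drop (i + 1)).take k) from by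
        rw [List.drop_eq_getElem_cons hltb, List.take_succ_cons]]
      have hga : PySem.List.pyGetD a (i : Int) 0 = a[i] := by
        simp [PySem.List.pyGetD_natCast, List.getD_eq_getElem?_getD, hlt]
      have hgb : PySem.List.pyGetD bf (i : Int) 0 = bf[i] := by
        simp [PySem.List.pyGetD_natCast, List.getD_eq_getElem?_getD, hltb]
      rw [List.foldl_cons]
      by_cases hx : a[i] < bf[i]
      · have hstep : pvStepA a (bf, ans) i = (bf, ans + 1) := by
          simp [pvStepA, hga, hgb, hx]
        rw [hstep, ihk (i + 1) (by omega) bf (ans + 1) hlen (by omega)]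
        simp [pvF, hx]
        ring
      · have hinner := pvInnerA_eq_find a[i] bf a.length hlen (i + 1) (by omega)
        rw [show ((i + 1 : Nat) : Int) = (i : Int) + 1 from by omega,
          show a.length - (i + 1) = k from by omega] at hinner
        cases hfind : pvFind (fun t => a[i] < t) ((bf.drop (i + 1)).take k) with
        | none =>
            have hstep : pvStepA a (bf, ans) i = (bf, ans) := by
              simp [pvStepA, hga, hgb, hx, hinner, hfind]
            rw [hstep, ihk (i + 1) (by omega) bf ans hlen (by omega)]
            simp [pvF, hx, hfind]
        | some j =>
            have hnewlen : a.length ≤ ((bf.set (i + 1 + j) bf[i]).set i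
                (PySem.List.pyGetD bf ((i + 1 + j : Nat) : Int) 0)).length := by
              simp [hlen]
            have hstep : pvStepA a (bf, ans) i =
                ((bf.set (i + 1 + j) bf[i]).set i
                  (PySem.List.pyGetD bf ((i + 1 + j : Nat) : Int) 0), ans + 1) := by
              simp [pvStepA, hga, hgb, hx, hinner, hfind, PySem.List.pySetD_natCast]
              rw [show ((i : Int) + 1 + (j : Int)) = ((i + 1 + j : Nat) : Int) from by omega]
              simp only [PySem.List.pySetD_natCast]
            rw [hstep, ihk (i + 1) (by omega) _ (ans + 1) hnewlen (by omega)]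
            have hdropset : (((bf.set (i + 1 + j) bf[i]).set i
                (PySem.List.pyGetD bf ((i + 1 + j : Nat) : Int) 0)).drop (i + 1)).take k =
                ((bf.drop (i + 1)).take k).set j bf[i] := by
              rw [List.drop_set, List.drop_set]
              simp only [if_pos (by omega : i < i + 1), if_neg (by omega : ¬ i + 1 + j < i + 1)]
              rw [show i + 1 + j - (i + 1) = j from by omega, List.take_set]
            rw [hdropset]
            simp [pvF, hx, hfind]
            ring

-- ===== bridge B: the two-pointer fold equals the sorted greedy =====

theorem pvAdvance_drop (sb : List Int) (x : Int) :
    ∀ pos : Nat, sb.drop (pvAdvance sb x pos) = (sb.drop pos).dropWhile (fun y => y ≤ x) := by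
  intro pos
  induction hk : sb.length - pos generalizing pos with
  | zero =>
      have hdrop : sb.drop pos = [] := List.drop_eq_nil_of_le (by omega)
      rw [pvAdvance]
      simp only [dif_neg (by omega : ¬ pos < sb.length)]
      simp [hdrop]
  | succ k ihk =>
      have hlt : pos < sb.length := by omega
      rw [pvAdvance]
      simp only [dif_pos hlt]
      by_cases hx : sb[pos] ≤ x
      · rw [if_pos hx, ihk (pos + 1) (by omega), List.drop_eq_getElem_cons hlt,
          List.dropWhile_cons]
        simp [hx]
      · rw [if_neg hx, List.drop_eq_getElem_cons hlt, List.dropWhile_cons]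
        simp [hx]

theorem pvBridgeB (sb : List Int) :
    ∀ (a : List Int) (pos : Nat) (ans : Int),
      (a.foldl (pvStepB sb) (pos, ans)).2 = ans + pvG a (sb.drop pos) := by
  intro a
  induction a with
  | nil => intro pos ans; simp [pvG]
  | cons x a' ih =>
      intro pos ans
      have hadv := pvAdvance_drop sb x pos
      rw [List.foldl_cons]
      by_cases hp : pvAdvance sb x pos < sb.length
      · have hstep : pvStepB sb (pos, ans) x = (pvAdvance sb x pos + 1, ans + 1) := by
          simp [pvStepB, hp]
        have hdw : (sb.drop pos).dropWhile (fun y => y ≤ x) =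
            sb[pvAdvance sb x pos] :: sb.drop (pvAdvance sb x pos + 1) := by
          rw [← hadv, List.drop_eq_getElem_cons hp]
        rw [hstep, ih]
        simp only [pvG]
        rw [hdw]
        simp
        ring
      · have hstep : pvStepB sb (pos, ans) x = (pvAdvance sb x pos, ans) := by
          simp [pvStepB, hp]
        have hdw : (sb.drop pos).dropWhile (fun y => y ≤ x) = [] := by
          rw [← hadv]
          exact List.drop_eq_nil_of_le (by omega)
        rw [hstep, ih]
        have : sb.drop (pvAdvance sb x pos) = [] := List.drop_eq_nil_of_le (by omega)
        simp [pvG, hdw, this, pvG_nil]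

-- ===== VERDICT (by name: the statement is the Claim_ definition above) =====
theorem solution_spec : Claim_equal_solution := by
  intro A B _ hpre
  unfold Spec_solution solution solution_alt
  set a := PySem.List.sorted A (fun v => v) false with ha
  set b := PySem.List.sorted B (fun v => v) false with hb
  have hlenA : a.length = A.length := by rw [ha, PySem.List.length_sorted]
  have hlen : a.length ≤ b.length := by
    rw [ha, hb, PySem.List.length_sorted, PySem.List.length_sorted]
    exact hpre
  have hslice : PySem.List.slice b none (some (A.length : Int)) = b.take a.length := by
    rw [PySem.List.slice_to_natCast, hlenA]
  have hA : ((PySem.List.pyRange 0 a.length 1).foldl (pvStepA a) (b, 0)).2 =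
      pvF a (b.take a.length) := by
    have := pvBridgeA a 0 b 0 hlen (by omega)
    simpa using this
  have hB : (a.foldl (pvStepB (b.take a.length)) (0, 0)).2 = pvG a (b.take a.length) := by
    have := pvBridgeB (b.take a.length) a 0 0
    simpa using this
  have hsa : a.Pairwise (· ≤ ·) := by
    have := PySem.List.sorted_pairwise A (fun v => v)
    simpa [ha] using this
  have hsb : b.Pairwise (· ≤ ·) := by
    have := PySem.List.sorted_pairwise B (fun v => v)
    simpa [hb] using this
  have hst : (b.take a.length).Pairwise (· ≤ ·) := hsb.sublist (List.take_sublist ..)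
  have hstl : (b.take a.length).length = a.length := by
    simp [List.length_take]
    omega
  rw [hA, hslice, hB]
  exact pvF_eq_pvG a (b.take a.length) (b.take a.length) hsa hst
    (pvMix_refl _ (b.take a.length)) hstl
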